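-- pv_equiv track=rewrite | github.com/gfaxardo/controltower | backend/app/services/omniview_matrix_integrity_service.py | cluster_config_for_code
-- ===== SOURCE A (Python) =====
-- from typing import Any
--
-- ISSUE_CLUSTER_CONFIG: dict[str, dict[str, Any]] = {
--     "freshness_pipeline": {
--         "label": "Freshness / pipeline",
--         "description": "Incidencias de lag, huecos o lectura base que anticipan degradación operativa.",
--         "codes": frozenset(
--             {
--                 "FACTS_UNREADABLE",
--                 "DERIVED_BEHIND_SOURCE",
--                 "DERIVED_AHEAD_OF_BOUNDED_SOURCE",
--                 "SOURCE_MAX_UNAVAILABLE",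
--                 "DAY_FACT_DATE_GAPS",
--                 "GAP_QUERY_FAILED",
--             }
--         ),
--     },
--     "reconciliation": {
--         "label": "Reconciliación canon",
--         "description": "Descuadres entre rollups/facts y el universo canon resolved.",
--         "codes": frozenset(
--             {
--                 "ROLLUP_MISMATCH",
--                 "MONTH_TRIPS_MISMATCH",
--                 "MONTH_REVENUE_MISMATCH",
--                 "ROLLUP_CHECK_FAILED",
--                 "MONTH_COMPARE_FAILED",
--             }
--         ),
--     },
--     "coverage_range": {
--         "label": "Coverage / rango",
--         "description": "Cobertura temporal insuficiente o huecos que debilitan lectura ejecutiva.",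
--         "codes": frozenset(
--             {
--                 "NO_DAY_FACT",
--                 "MONTHS_BELOW_MIN",
--                 "WEEKS_BELOW_MIN",
--                 "DAYS_BELOW_MIN",
--                 "MONTH_COMPARE_SKIPPED",
--             }
--         ),
--     },
--     "revenue_semantics": {
--         "label": "Revenue semantics",
--         "description": "Revenue con semántica de negocio inconsistente respecto a viajes completados.",
--         "codes": frozenset(
--             {
--                 "REVENUE_WITHOUT_COMPLETED",
--                 "NEGATIVE_REVENUE_ROWS",
--             }
--         ),
--     },
-- }
--
-- def cluster_config_for_code(code: str) -> dict[str, Any]: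
--     c = str(code or "")
--     for key, cfg in ISSUE_CLUSTER_CONFIG.items():
--         if c in cfg["codes"]:
--             return {
--                 "cluster_key": key,
--                 "cluster_label": cfg["label"],
--                 "cluster_description": cfg["description"],
--             }
--     return {
--         "cluster_key": "other",
--         "cluster_label": "Otros",
--         "cluster_description": "Incidencias operativas no agrupadas en un cluster principal.",
--     }
-- ===== SOURCE B (Python) =====
-- from typing import Any
--
-- ISSUE_CLUSTER_CONFIG: dict[str, dict[str, Any]] = {
--     "freshness_pipeline": {
--         "label": "Freshness / pipeline",
--         "description": "Incidencias de lag, huecos o lectura base que anticipan degradación operativa.",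
--         "codes": frozenset(
--             {
--                 "FACTS_UNREADABLE",
--                 "DERIVED_BEHIND_SOURCE",
--                 "DERIVED_AHEAD_OF_BOUNDED_SOURCE",
--                 "SOURCE_MAX_UNAVAILABLE",
--                 "DAY_FACT_DATE_GAPS",
--                 "GAP_QUERY_FAILED",
--             }
--         ),
--     },
--     "reconciliation": {
--         "label": "Reconciliación canon",
--         "description": "Descuadres entre rollups/facts y el universo canon resolved.",
--         "codes": frozenset(
--             {
--                 "ROLLUP_MISMATCH",
--                 "MONTH_TRIPS_MISMATCH",
--                 "MONTH_REVENUE_MISMATCH",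
--                 "ROLLUP_CHECK_FAILED",
--                 "MONTH_COMPARE_FAILED",
--             }
--         ),
--     },
--     "coverage_range": {
--         "label": "Coverage / rango",
--         "description": "Cobertura temporal insuficiente o huecos que debilitan lectura ejecutiva.",
--         "codes": frozenset(
--             {
--                 "NO_DAY_FACT",
--                 "MONTHS_BELOW_MIN",
--                 "WEEKS_BELOW_MIN",
--                 "DAYS_BELOW_MIN",
--                 "MONTH_COMPARE_SKIPPED",
--             }
--         ),
--     },
--     "revenue_semantics": {
--         "label": "Revenue semantics",
--         "description": "Revenue con semántica de negocio inconsistente respecto a viajes completados.",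
--         "codes": frozenset(
--             {
--                 "REVENUE_WITHOUT_COMPLETED",
--                 "NEGATIVE_REVENUE_ROWS",
--             }
--         ),
--     },
-- }
--
-- # Flat reverse index built once at module load: code -> (cluster_key, label, description).
-- CODE_TO_CLUSTER: dict[str, tuple[str, str, str]] = {
--     c: (key, cfg["label"], cfg["description"])
--     for key, cfg in ISSUE_CLUSTER_CONFIG.items()
--     for c in cfg["codes"]
-- }
--
--
-- def cluster_config_for_code(code: str) -> dict[str, Any]:
--     hit = CODE_TO_CLUSTER.get(str(code or ""))
--     if hit is None:
--         return {
--             "cluster_key": "other",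
--             "cluster_label": "Otros",
--             "cluster_description": "Incidencias operativas no agrupadas en un cluster principal.",
--         }
--     key, label, description = hit
--     return {
--         "cluster_key": key,
--         "cluster_label": label,
--         "cluster_description": description,
--     }
-- ===== Notes on version B (the rewrite author's own statement) =====
-- stated objective: idiomatic
-- what changed: Replaces the per-call scan over all clusters with a flat reverse-index dict (code -> (key,label,description)) built once at module load and a single dict lookup per call.
import Mathlib
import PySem

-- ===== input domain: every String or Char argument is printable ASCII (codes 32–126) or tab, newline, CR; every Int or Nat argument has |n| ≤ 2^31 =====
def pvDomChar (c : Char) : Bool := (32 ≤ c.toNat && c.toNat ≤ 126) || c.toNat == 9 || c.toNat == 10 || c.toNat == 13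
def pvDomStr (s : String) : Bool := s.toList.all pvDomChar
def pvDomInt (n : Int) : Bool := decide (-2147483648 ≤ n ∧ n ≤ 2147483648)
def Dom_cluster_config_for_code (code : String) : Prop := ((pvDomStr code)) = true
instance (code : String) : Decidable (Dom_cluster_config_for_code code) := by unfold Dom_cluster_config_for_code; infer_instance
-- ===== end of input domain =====

-- B replaces A's per-call scan over the clusters by a flat reverse index (code -> cluster triple)
-- built once, plus a single lookup (idiomatic; return value only — both return a fresh dict).

-- ===== PORT A =====
-- ISSUE_CLUSTER_CONFIG as (key, label, description, codes); frozenset codes as a distinct-element list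
-- (only membership is used, so iteration order of the frozenset is irrelevant).
def pvIssueClusterConfig : List (String × String × String × List String) :=
  [ ("freshness_pipeline", "Freshness / pipeline",
     "Incidencias de lag, huecos o lectura base que anticipan degradación operativa.",
     ["FACTS_UNREADABLE", "DERIVED_BEHIND_SOURCE", "DERIVED_AHEAD_OF_BOUNDED_SOURCE",
      "SOURCE_MAX_UNAVAILABLE", "DAY_FACT_DATE_GAPS", "GAP_QUERY_FAILED"]),
    ("reconciliation", "Reconciliación canon",
     "Descuadres entre rollups/facts y el universo canon resolved.",
     ["ROLLUP_MISMATCH", "MONTH_TRIPS_MISMATCH", "MONTH_REVENUE_MISMATCH",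
      "ROLLUP_CHECK_FAILED", "MONTH_COMPARE_FAILED"]),
    ("coverage_range", "Coverage / rango",
     "Cobertura temporal insuficiente o huecos que debilitan lectura ejecutiva.",
     ["NO_DAY_FACT", "MONTHS_BELOW_MIN", "WEEKS_BELOW_MIN", "DAYS_BELOW_MIN",
      "MONTH_COMPARE_SKIPPED"]),
    ("revenue_semantics", "Revenue semantics",
     "Revenue con semántica de negocio inconsistente respecto a viajes completados.",
     ["REVENUE_WITHOUT_COMPLETED", "NEGATIVE_REVENUE_ROWS"]) ]

def pvOtherDict : List (String × String) :=
  [("cluster_key", "other"), ("cluster_label", "Otros"),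
   ("cluster_description", "Incidencias operativas no agrupadas en un cluster principal.")]

-- the for-loop with early return over ISSUE_CLUSTER_CONFIG.items()
def pvScan (c : String) : List (String × String × String × List String) → List (String × String)
  | [] => pvOtherDict
  | (key, label, descr, codes) :: rest =>
      if c ∈ codes then
        [("cluster_key", key), ("cluster_label", label), ("cluster_description", descr)]
      else pvScan c rest

def cluster_config_for_code (code : String) : List (String × String) :=
  -- str(code or "") is the string itself ('' stays '')
  let c := code
  pvScan c pvIssueClusterConfig

-- ===== PORT B =====
-- CODE_TO_CLUSTER: flat reverse index built once by one comprehension over the config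
def pvCodeToCluster : PySem.Dict String (String × String × String) :=
  PySem.Dict.ofList
    (pvIssueClusterConfig.flatMap
      (fun kc => kc.2.2.2.map (fun c => (c, (kc.1, kc.2.1, kc.2.2.1)))))

def cluster_config_for_code_alt (code : String) : List (String × String) :=
  match pvCodeToCluster.get? code with
  | none => pvOtherDict
  | some (key, label, descr) =>
      [("cluster_key", key), ("cluster_label", label), ("cluster_description", descr)]

-- ===== PRECONDITION & SPEC =====
def Spec_cluster_config_for_code (code : String) (out : List (String × String)) : Prop := out = cluster_config_for_code_alt code
instance (code : String) (out : List (String × String)) : Decidable (Spec_cluster_config_for_code code out) := by unfold Spec_cluster_config_for_code; infer_instance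

-- ===== CLAIM (what is proved, stated in full; the proofs are below) =====
def Claim_equal_cluster_config_for_code : Prop := ∀ (code : String), Dom_cluster_config_for_code code → Spec_cluster_config_for_code code (cluster_config_for_code code)

-- ===== LEMMAS AND PROOFS =====
def pvAllCodes : List String :=
  ["FACTS_UNREADABLE", "DERIVED_BEHIND_SOURCE", "DERIVED_AHEAD_OF_BOUNDED_SOURCE",
   "SOURCE_MAX_UNAVAILABLE", "DAY_FACT_DATE_GAPS", "GAP_QUERY_FAILED",
   "ROLLUP_MISMATCH", "MONTH_TRIPS_MISMATCH", "MONTH_REVENUE_MISMATCH",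
   "ROLLUP_CHECK_FAILED", "MONTH_COMPARE_FAILED",
   "NO_DAY_FACT", "MONTHS_BELOW_MIN", "WEEKS_BELOW_MIN", "DAYS_BELOW_MIN",
   "MONTH_COMPARE_SKIPPED", "REVENUE_WITHOUT_COMPLETED", "NEGATIVE_REVENUE_ROWS"]

theorem pv_eq (code : String) :
    cluster_config_for_code code = cluster_config_for_code_alt code := by
  by_cases h : code ∈ pvAllCodes
  · fin_cases h <;> decide
  · simp only [pvAllCodes, List.mem_cons, List.not_mem_nil, or_false, not_or] at h
    obtain ⟨h1, h2, h3, h4, h5, h6, h7, h8, h9, h10, h11, h12, h13, h14, h15, h16, h17, h18⟩ := h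
    simp [cluster_config_for_code, cluster_config_for_code_alt, pvScan, pvIssueClusterConfig,
      pvCodeToCluster, PySem.Dict.ofList, PySem.Dict.get?, PySem.Dict.update,
      PySem.Dict.insert, PySem.Dict.empty, PySem.Dict.contains, List.find?,
      h1, h2, h3, h4, h5, h6, h7, h8, h9, h10, h11, h12, h13, h14, h15, h16, h17, h18,
      beq_eq_false_iff_ne.mpr (Ne.symm h1), beq_eq_false_iff_ne.mpr (Ne.symm h2),
      beq_eq_false_iff_ne.mpr (Ne.symm h3), beq_eq_false_iff_ne.mpr (Ne.symm h4),
      beq_eq_false_iff_ne.mpr (Ne.symm h5), beq_eq_false_iff_ne.mpr (Ne.symm h6),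
      beq_eq_false_iff_ne.mpr (Ne.symm h7), beq_eq_false_iff_ne.mpr (Ne.symm h8),
      beq_eq_false_iff_ne.mpr (Ne.symm h9), beq_eq_false_iff_ne.mpr (Ne.symm h10),
      beq_eq_false_iff_ne.mpr (Ne.symm h11), beq_eq_false_iff_ne.mpr (Ne.symm h12),
      beq_eq_false_iff_ne.mpr (Ne.symm h13), beq_eq_false_iff_ne.mpr (Ne.symm h14),
      beq_eq_false_iff_ne.mpr (Ne.symm h15), beq_eq_false_iff_ne.mpr (Ne.symm h16),
      beq_eq_false_iff_ne.mpr (Ne.symm h17), beq_eq_false_iff_ne.mpr (Ne.symm h18)]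

-- ===== VERDICT (by name: the statement is the Claim_ definition above) =====
theorem cluster_config_for_code_spec : Claim_equal_cluster_config_for_code := by
  intro code _
  exact pv_eq code
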